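-- pv_equiv track=rewrite | github.com/kianak2002/Profiles-Bioinformatics | main.py | check_without_gap
-- ===== SOURCE A (Python) =====
-- def check_without_gap(seq_gap, seq):
--     check = ''
--     for char in seq_gap:
--         if char != '-':
--             check += char
--     if check == seq:
--         return True
--     else:
--         return False
-- ===== SOURCE B (Python) =====
-- def check_without_gap(seq_gap, seq):
--     i = 0
--     n = len(seq)
--     for char in seq_gap:
--         if char != '-':
--             if i >= n or seq[i] != char:
--                 return False
--             i += 1
--     return i == n
-- ===== Notes on version B (the rewrite author's own statement) =====
-- stated objective: alternative
-- what changed: Instead of building the gap-stripped string and comparing it whole, B walks seq_gap once with a position index into seq, failing early on the first mismatch and checking at the end that all of seq was consumed.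
import Mathlib
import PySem

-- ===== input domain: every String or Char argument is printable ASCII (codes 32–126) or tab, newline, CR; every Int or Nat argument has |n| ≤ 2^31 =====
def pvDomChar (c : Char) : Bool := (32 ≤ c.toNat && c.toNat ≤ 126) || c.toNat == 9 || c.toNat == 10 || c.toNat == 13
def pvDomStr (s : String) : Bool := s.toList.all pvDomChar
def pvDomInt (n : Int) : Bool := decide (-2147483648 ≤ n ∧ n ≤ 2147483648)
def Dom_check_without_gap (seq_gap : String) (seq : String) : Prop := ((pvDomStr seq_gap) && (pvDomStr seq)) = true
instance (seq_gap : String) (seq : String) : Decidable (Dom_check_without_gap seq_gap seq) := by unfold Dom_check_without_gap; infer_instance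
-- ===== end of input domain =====

-- B replaces A's build-then-compare with a single two-pointer pass (early exit); alternative decomposition, same cost.
-- ===== PORT A =====
def check_without_gap (seq_gap : String) (seq : String) : Bool :=
  let check := seq_gap.toList.foldl (fun acc char => if char != '-' then acc ++ [char] else acc) []
  if check = seq.toList then true else false

-- ===== PORT B =====
-- two-pointer pass: the index i into seq is represented by the remaining suffix of seq
def cwgGo : List Char → List Char → Bool
  | [], rest => rest.isEmpty
  | char :: gs, rest =>
    if char != '-' then
      match rest with
      | [] => false
      | r :: rs => if r = char then cwgGo gs rs else false
    else cwgGo gs rest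

def check_without_gap_alt (seq_gap : String) (seq : String) : Bool :=
  cwgGo seq_gap.toList seq.toList

-- ===== PRECONDITION & SPEC =====
def Spec_check_without_gap (seq_gap : String) (seq : String) (out : Bool) : Prop := out = check_without_gap_alt seq_gap seq
instance (seq_gap : String) (seq : String) (out : Bool) : Decidable (Spec_check_without_gap seq_gap seq out) := by unfold Spec_check_without_gap; infer_instance

-- ===== CLAIM (what is proved, stated in full; the proofs are below) =====
def Claim_equal_check_without_gap : Prop := ∀ (seq_gap : String) (seq : String), Dom_check_without_gap seq_gap seq → Spec_check_without_gap seq_gap seq (check_without_gap seq_gap seq)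

-- ===== LEMMAS AND PROOFS =====

-- ===== VERDICT (by name: the statement is the Claim_ definition above) =====
lemma cwgGo_eq_filter (gs rest : List Char) :
    cwgGo gs rest = decide (gs.filter (fun c => c != '-') = rest) := by
  induction gs generalizing rest with
  | nil => cases rest <;> simp [cwgGo, List.isEmpty]
  | cons c gs ih =>
    by_cases hc : c = '-'
    · subst hc; simp [cwgGo, List.filter_cons, ih]
    · cases rest with
      | nil => simp [cwgGo, List.filter_cons, hc]
      | cons r rs =>
        by_cases hr : r = c
        · subst hr; simp [cwgGo, List.filter_cons, hc, ih]
        · simp [cwgGo, List.filter_cons, hc, hr, Ne.symm hr]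

lemma foldl_append_filter (gs acc : List Char) :
    gs.foldl (fun acc char => if char != '-' then acc ++ [char] else acc) acc
      = acc ++ gs.filter (fun c => c != '-') := by
  induction gs generalizing acc with
  | nil => simp
  | cons c gs ih =>
    rw [List.foldl_cons, List.filter_cons]
    by_cases hc : c = '-'
    · subst hc
      rw [if_neg (by decide), if_neg (by decide), ih]
    · have hb : (c != '-') = true := by simp [hc]
      rw [if_pos (by simp [hb]), if_pos (by simp [hb]), ih, List.append_assoc]
      rfl

theorem check_without_gap_spec : Claim_equal_check_without_gap := by
  intro seq_gap seq _
  unfold Spec_check_without_gap check_without_gap check_without_gap_alt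
  rw [cwgGo_eq_filter, foldl_append_filter]
  simp only [List.nil_append]
  by_cases h : seq_gap.toList.filter (fun c => c != '-') = seq.toList <;> simp [h]
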